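-- pv_equiv track=rewrite | github.com/contatomadameka-maker/alpha-dolar-template-2 | flask_app.py | _best_barrier
-- ===== SOURCE A (Python) =====
-- def _best_barrier(freq):
--     best = None
--     for barrier in range(1, 9):
--         po = sum(freq.get(d, 0) for d in range(barrier + 1, 10))
--         pu = sum(freq.get(d, 0) for d in range(0, barrier))
--         direction = 'OVER' if po >= pu else 'UNDER'
--         confidence = max(po, pu)
--         if best is None or confidence > best[2]:
--             best = (barrier, direction, confidence)
--     return best  # (barrier, direction, confidence)
-- ===== SOURCE B (Python) =====
-- def _best_barrier(freq):
--     # prefix[i] = sum of freq.get(d,0) for d < i: one pass, then O(1) lookups per barrier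
--     prefix = [0]
--     for d in range(10):
--         prefix.append(prefix[-1] + freq.get(d, 0))
--     total = prefix[10]
--     pu = prefix[1]
--     po = total - prefix[2]
--     best = (1, 'OVER' if po >= pu else 'UNDER', max(po, pu))
--     for barrier in range(2, 9):
--         pu = prefix[barrier]
--         po = total - prefix[barrier + 1]
--         if max(po, pu) > best[2]:
--             best = (barrier, 'OVER' if po >= pu else 'UNDER', max(po, pu))
--     return best
-- ===== Notes on version B (the rewrite author's own statement) =====
-- stated objective: alternative
-- what changed: B builds a cumulative prefix-sum array over digit frequencies 0..9 in one pass and computes each barrier's under/over totals by two O(1) lookups, instead of A's re-summation over the digit ranges for every one of the 8 barriers; the strict '>' tie-break (lowest barrier wins ties) is preserved.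
import Mathlib
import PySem

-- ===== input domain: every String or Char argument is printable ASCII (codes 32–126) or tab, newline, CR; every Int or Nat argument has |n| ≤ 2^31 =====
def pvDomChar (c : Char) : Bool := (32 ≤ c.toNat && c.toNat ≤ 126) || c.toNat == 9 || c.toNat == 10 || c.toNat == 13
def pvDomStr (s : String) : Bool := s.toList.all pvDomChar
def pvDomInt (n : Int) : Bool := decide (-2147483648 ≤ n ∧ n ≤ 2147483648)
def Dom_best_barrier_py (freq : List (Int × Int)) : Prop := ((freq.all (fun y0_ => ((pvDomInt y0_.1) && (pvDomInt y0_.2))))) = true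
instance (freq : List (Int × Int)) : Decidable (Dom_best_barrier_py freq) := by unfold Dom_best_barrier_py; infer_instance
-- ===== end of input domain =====

-- B replaces A's per-barrier re-summation of digit frequencies by one prefix-sum pass
-- with O(1) lookups per barrier (objective: alternative; same cost, different traversal).

-- ===== PORT A =====
-- literal port of Source A; range(1,9) is nonempty so the fold's result is always `some`
-- and the final `.getD` default is never used.
def best_barrier_py (freq : List (Int × Int)) : Int × String × Int :=
  ((PySem.List.pyRange 1 9 1).foldl (fun best barrier =>
      let po := (PySem.List.pyRange (barrier + 1) 10 1).foldl
        (fun acc d => acc + PySem.Dict.getD (PySem.Dict.mk freq) d 0) 0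
      let pu := (PySem.List.pyRange 0 barrier 1).foldl
        (fun acc d => acc + PySem.Dict.getD (PySem.Dict.mk freq) d 0) 0
      let direction := if po ≥ pu then "OVER" else "UNDER"
      let confidence := max po pu
      match best with
      | none => some (barrier, direction, confidence)
      | some b => if confidence > b.2.2 then some (barrier, direction, confidence) else some b)
    (none : Option (Int × String × Int))).getD (0, "", 0)

-- ===== PORT B =====
-- literal port of Source B; all list indices are in range (prefix has 11 elements),
-- so the `.getD 0` totalisation of pyGet? is never the default.
def best_barrier_py_alt (freq : List (Int × Int)) : Int × String × Int :=
  let pfx : List Int := (PySem.List.pyRange 0 10 1).foldl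
      (fun ps d => ps ++ [(PySem.List.pyGet? ps (-1)).getD 0 + PySem.Dict.getD (PySem.Dict.mk freq) d 0])
      [(0 : Int)]
  let total := (PySem.List.pyGet? pfx 10).getD 0
  let pu := (PySem.List.pyGet? pfx 1).getD 0
  let po := total - (PySem.List.pyGet? pfx 2).getD 0
  let best := ((1 : Int), (if po ≥ pu then "OVER" else "UNDER"), max po pu)
  (PySem.List.pyRange 2 9 1).foldl (fun best barrier =>
      let pu := (PySem.List.pyGet? pfx barrier).getD 0
      let po := total - (PySem.List.pyGet? pfx (barrier + 1)).getD 0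
      if max po pu > best.2.2 then
        (barrier, (if po ≥ pu then "OVER" else "UNDER"), max po pu)
      else best)
    best

-- ===== PRECONDITION & SPEC =====
def Spec_best_barrier_py (freq : List (Int × Int)) (out : Int × String × Int) : Prop := out = best_barrier_py_alt freq
instance (freq : List (Int × Int)) (out : Int × String × Int) : Decidable (Spec_best_barrier_py freq out) := by unfold Spec_best_barrier_py; infer_instance

-- ===== CLAIM (what is proved, stated in full; the proofs are below) =====
def Claim_equal_best_barrier_py : Prop := ∀ (freq : List (Int × Int)), Dom_best_barrier_py freq → Spec_best_barrier_py freq (best_barrier_py freq)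

-- ===== LEMMAS AND PROOFS =====
def pvStepA (freq : List (Int × Int)) (t : Int × String × Int) (barrier : Int) : Int × String × Int :=
  let po := (PySem.List.pyRange (barrier + 1) 10 1).foldl
    (fun acc d => acc + PySem.Dict.getD (PySem.Dict.mk freq) d 0) 0
  let pu := (PySem.List.pyRange 0 barrier 1).foldl
    (fun acc d => acc + PySem.Dict.getD (PySem.Dict.mk freq) d 0) 0
  if max po pu > t.2.2 then (barrier, (if po ≥ pu then "OVER" else "UNDER"), max po pu) else t

lemma pvStepA_opt (freq : List (Int × Int)) (t : Int × String × Int) (b : Int) :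
    (fun best barrier =>
      let po := (PySem.List.pyRange (barrier + 1) 10 1).foldl
        (fun acc d => acc + PySem.Dict.getD (PySem.Dict.mk freq) d 0) 0
      let pu := (PySem.List.pyRange 0 barrier 1).foldl
        (fun acc d => acc + PySem.Dict.getD (PySem.Dict.mk freq) d 0) 0
      let direction := if po ≥ pu then "OVER" else "UNDER"
      let confidence := max po pu
      match best with
      | none => some (barrier, direction, confidence)
      | some b => if confidence > b.2.2 then some (barrier, direction, confidence) else some b)
    (some t) b = some (pvStepA freq t b) := by
  show (if max ((PySem.List.pyRange (b + 1) 10 1).foldl (fun acc d => acc + PySem.Dict.getD (PySem.Dict.mk freq) d 0) 0)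
               ((PySem.List.pyRange 0 b 1).foldl (fun acc d => acc + PySem.Dict.getD (PySem.Dict.mk freq) d 0) 0) > t.2.2
    then some (b, (if ((PySem.List.pyRange (b + 1) 10 1).foldl (fun acc d => acc + PySem.Dict.getD (PySem.Dict.mk freq) d 0) 0)
          ≥ ((PySem.List.pyRange 0 b 1).foldl (fun acc d => acc + PySem.Dict.getD (PySem.Dict.mk freq) d 0) 0) then "OVER" else "UNDER"),
          max ((PySem.List.pyRange (b + 1) 10 1).foldl (fun acc d => acc + PySem.Dict.getD (PySem.Dict.mk freq) d 0) 0)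
              ((PySem.List.pyRange 0 b 1).foldl (fun acc d => acc + PySem.Dict.getD (PySem.Dict.mk freq) d 0) 0))
    else some t) = some (pvStepA freq t b)
  split_ifs with hc <;> simp [pvStepA, hc] <;> omega

lemma pvFoldSome {α β : Type} (f : α → β → α) (F : Option α → β → Option α)
    (hF : ∀ t b, F (some t) b = some (f t b)) :
    ∀ (l : List β) (t : α), l.foldl F (some t) = some (l.foldl f t) := by
  intro l
  induction l with
  | nil => intro t; rfl
  | cons b l ih => intro t; rw [List.foldl_cons, List.foldl_cons, hF]; exact ih _

def pvG (freq : List (Int × Int)) (d : Int) : Int := PySem.Dict.getD (PySem.Dict.mk freq) d 0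

lemma pvPfx (freq : List (Int × Int)) :
    (PySem.List.pyRange 0 10 1).foldl
      (fun ps d => ps ++ [(PySem.List.pyGet? ps (-1)).getD 0 + PySem.Dict.getD (PySem.Dict.mk freq) d 0])
      [(0 : Int)] =
    [0, pvG freq 0, pvG freq 0 + pvG freq 1, pvG freq 0 + pvG freq 1 + pvG freq 2,
     pvG freq 0 + pvG freq 1 + pvG freq 2 + pvG freq 3,
     pvG freq 0 + pvG freq 1 + pvG freq 2 + pvG freq 3 + pvG freq 4,
     pvG freq 0 + pvG freq 1 + pvG freq 2 + pvG freq 3 + pvG freq 4 + pvG freq 5,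
     pvG freq 0 + pvG freq 1 + pvG freq 2 + pvG freq 3 + pvG freq 4 + pvG freq 5 + pvG freq 6,
     pvG freq 0 + pvG freq 1 + pvG freq 2 + pvG freq 3 + pvG freq 4 + pvG freq 5 + pvG freq 6 + pvG freq 7,
     pvG freq 0 + pvG freq 1 + pvG freq 2 + pvG freq 3 + pvG freq 4 + pvG freq 5 + pvG freq 6 + pvG freq 7 + pvG freq 8,
     pvG freq 0 + pvG freq 1 + pvG freq 2 + pvG freq 3 + pvG freq 4 + pvG freq 5 + pvG freq 6 + pvG freq 7 + pvG freq 8 + pvG freq 9] := by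
  rw [show PySem.List.pyRange 0 10 1 = [0,1,2,3,4,5,6,7,8,9] from by decide]
  simp [PySem.List.pyGet?, PySem.List.pyIdx?, pvG]

def pvInitA (freq : List (Int × Int)) : Int × String × Int :=
  let po := (PySem.List.pyRange 2 10 1).foldl
    (fun acc d => acc + PySem.Dict.getD (PySem.Dict.mk freq) d 0) 0
  let pu := (PySem.List.pyRange 0 1 1).foldl
    (fun acc d => acc + PySem.Dict.getD (PySem.Dict.mk freq) d 0) 0
  ((1 : Int), (if po ≥ pu then "OVER" else "UNDER"), max po pu)

lemma pvA_plain (freq : List (Int × Int)) :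
    best_barrier_py freq = (PySem.List.pyRange 2 9 1).foldl (pvStepA freq) (pvInitA freq) := by
  unfold best_barrier_py
  rw [show PySem.List.pyRange 1 9 1 = 1 :: PySem.List.pyRange 2 9 1 from by decide, List.foldl_cons]
  show ((PySem.List.pyRange 2 9 1).foldl _ (some (pvInitA freq))).getD (0, "", 0) = _
  rw [pvFoldSome (pvStepA freq) _ (pvStepA_opt freq) _ (pvInitA freq), Option.getD_some]
def pvPfxL (freq : List (Int × Int)) : List Int :=
  [0, pvG freq 0, pvG freq 0 + pvG freq 1, pvG freq 0 + pvG freq 1 + pvG freq 2,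
   pvG freq 0 + pvG freq 1 + pvG freq 2 + pvG freq 3,
   pvG freq 0 + pvG freq 1 + pvG freq 2 + pvG freq 3 + pvG freq 4,
   pvG freq 0 + pvG freq 1 + pvG freq 2 + pvG freq 3 + pvG freq 4 + pvG freq 5,
   pvG freq 0 + pvG freq 1 + pvG freq 2 + pvG freq 3 + pvG freq 4 + pvG freq 5 + pvG freq 6,
   pvG freq 0 + pvG freq 1 + pvG freq 2 + pvG freq 3 + pvG freq 4 + pvG freq 5 + pvG freq 6 + pvG freq 7,
   pvG freq 0 + pvG freq 1 + pvG freq 2 + pvG freq 3 + pvG freq 4 + pvG freq 5 + pvG freq 6 + pvG freq 7 + pvG freq 8,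
   pvG freq 0 + pvG freq 1 + pvG freq 2 + pvG freq 3 + pvG freq 4 + pvG freq 5 + pvG freq 6 + pvG freq 7 + pvG freq 8 + pvG freq 9]

def pvStepB (freq : List (Int × Int)) (best : Int × String × Int) (barrier : Int) : Int × String × Int :=
  let pu := (PySem.List.pyGet? (pvPfxL freq) barrier).getD 0
  let po := (PySem.List.pyGet? (pvPfxL freq) 10).getD 0 - (PySem.List.pyGet? (pvPfxL freq) (barrier + 1)).getD 0
  if max po pu > best.2.2 then
    (barrier, (if po ≥ pu then "OVER" else "UNDER"), max po pu)
  else best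

def pvInitB (freq : List (Int × Int)) : Int × String × Int :=
  let pu := (PySem.List.pyGet? (pvPfxL freq) 1).getD 0
  let po := (PySem.List.pyGet? (pvPfxL freq) 10).getD 0 - (PySem.List.pyGet? (pvPfxL freq) 2).getD 0
  ((1 : Int), (if po ≥ pu then "OVER" else "UNDER"), max po pu)

lemma pvB_plain (freq : List (Int × Int)) :
    best_barrier_py_alt freq =
      (PySem.List.pyRange 2 9 1).foldl (fun best barrier => pvStepB freq best barrier) (pvInitB freq) := by
  simp only [best_barrier_py_alt, pvPfx, pvStepB, pvInitB, pvPfxL]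
  rfl
def pvCanon (po pu k : Int) (t : Int × String × Int) : Int × String × Int :=
  if max po pu > t.2.2 then (k, (if po ≥ pu then "OVER" else "UNDER"), max po pu) else t

lemma pvCanon_eq {po pu po' pu' : Int} (k : Int) (t : Int × String × Int)
    (hpo : po = po') (hpu : pu = pu') : pvCanon po pu k t = pvCanon po' pu' k t := by
  rw [hpo, hpu]

lemma pvStep_eq (freq : List (Int × Int)) (acc : Int × String × Int) (x : Int)
    (hx : x ∈ PySem.List.pyRange 2 9 1) : pvStepA freq acc x = pvStepB freq acc x := by
  have hb := PySem.List.mem_pyRange_one.mp hx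
  obtain ⟨h1, h2⟩ := hb
  interval_cases x
  · calc pvStepA freq acc 2
        _ = pvCanon (0 + pvG freq 3 + pvG freq 4 + pvG freq 5 + pvG freq 6 + pvG freq 7 + pvG freq 8 + pvG freq 9) (0 + pvG freq 0 + pvG freq 1) 2 acc := rfl
        _ = pvCanon ((pvG freq 0 + pvG freq 1 + pvG freq 2 + pvG freq 3 + pvG freq 4 + pvG freq 5 + pvG freq 6 + pvG freq 7 + pvG freq 8 + pvG freq 9) - (pvG freq 0 + pvG freq 1 + pvG freq 2)) (pvG freq 0 + pvG freq 1) 2 acc :=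
              pvCanon_eq _ _ (by unfold pvG; omega) (by unfold pvG; omega)
        _ = pvStepB freq acc 2 := rfl
  · calc pvStepA freq acc 3
        _ = pvCanon (0 + pvG freq 4 + pvG freq 5 + pvG freq 6 + pvG freq 7 + pvG freq 8 + pvG freq 9) (0 + pvG freq 0 + pvG freq 1 + pvG freq 2) 3 acc := rfl
        _ = pvCanon ((pvG freq 0 + pvG freq 1 + pvG freq 2 + pvG freq 3 + pvG freq 4 + pvG freq 5 + pvG freq 6 + pvG freq 7 + pvG freq 8 + pvG freq 9) - (pvG freq 0 + pvG freq 1 + pvG freq 2 + pvG freq 3)) (pvG freq 0 + pvG freq 1 + pvG freq 2) 3 acc :=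
              pvCanon_eq _ _ (by unfold pvG; omega) (by unfold pvG; omega)
        _ = pvStepB freq acc 3 := rfl
  · calc pvStepA freq acc 4
        _ = pvCanon (0 + pvG freq 5 + pvG freq 6 + pvG freq 7 + pvG freq 8 + pvG freq 9) (0 + pvG freq 0 + pvG freq 1 + pvG freq 2 + pvG freq 3) 4 acc := rfl
        _ = pvCanon ((pvG freq 0 + pvG freq 1 + pvG freq 2 + pvG freq 3 + pvG freq 4 + pvG freq 5 + pvG freq 6 + pvG freq 7 + pvG freq 8 + pvG freq 9) - (pvG freq 0 + pvG freq 1 + pvG freq 2 + pvG freq 3 + pvG freq 4)) (pvG freq 0 + pvG freq 1 + pvG freq 2 + pvG freq 3) 4 acc :=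
              pvCanon_eq _ _ (by unfold pvG; omega) (by unfold pvG; omega)
        _ = pvStepB freq acc 4 := rfl
  · calc pvStepA freq acc 5
        _ = pvCanon (0 + pvG freq 6 + pvG freq 7 + pvG freq 8 + pvG freq 9) (0 + pvG freq 0 + pvG freq 1 + pvG freq 2 + pvG freq 3 + pvG freq 4) 5 acc := rfl
        _ = pvCanon ((pvG freq 0 + pvG freq 1 + pvG freq 2 + pvG freq 3 + pvG freq 4 + pvG freq 5 + pvG freq 6 + pvG freq 7 + pvG freq 8 + pvG freq 9) - (pvG freq 0 + pvG freq 1 + pvG freq 2 + pvG freq 3 + pvG freq 4 + pvG freq 5)) (pvG freq 0 + pvG freq 1 + pvG freq 2 + pvG freq 3 + pvG freq 4) 5 acc :=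
              pvCanon_eq _ _ (by unfold pvG; omega) (by unfold pvG; omega)
        _ = pvStepB freq acc 5 := rfl
  · calc pvStepA freq acc 6
        _ = pvCanon (0 + pvG freq 7 + pvG freq 8 + pvG freq 9) (0 + pvG freq 0 + pvG freq 1 + pvG freq 2 + pvG freq 3 + pvG freq 4 + pvG freq 5) 6 acc := rfl
        _ = pvCanon ((pvG freq 0 + pvG freq 1 + pvG freq 2 + pvG freq 3 + pvG freq 4 + pvG freq 5 + pvG freq 6 + pvG freq 7 + pvG freq 8 + pvG freq 9) - (pvG freq 0 + pvG freq 1 + pvG freq 2 + pvG freq 3 + pvG freq 4 + pvG freq 5 + pvG freq 6)) (pvG freq 0 + pvG freq 1 + pvG freq 2 + pvG freq 3 + pvG freq 4 + pvG freq 5) 6 acc :=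
              pvCanon_eq _ _ (by unfold pvG; omega) (by unfold pvG; omega)
        _ = pvStepB freq acc 6 := rfl
  · calc pvStepA freq acc 7
        _ = pvCanon (0 + pvG freq 8 + pvG freq 9) (0 + pvG freq 0 + pvG freq 1 + pvG freq 2 + pvG freq 3 + pvG freq 4 + pvG freq 5 + pvG freq 6) 7 acc := rfl
        _ = pvCanon ((pvG freq 0 + pvG freq 1 + pvG freq 2 + pvG freq 3 + pvG freq 4 + pvG freq 5 + pvG freq 6 + pvG freq 7 + pvG freq 8 + pvG freq 9) - (pvG freq 0 + pvG freq 1 + pvG freq 2 + pvG freq 3 + pvG freq 4 + pvG freq 5 + pvG freq 6 + pvG freq 7)) (pvG freq 0 + pvG freq 1 + pvG freq 2 + pvG freq 3 + pvG freq 4 + pvG freq 5 + pvG freq 6) 7 acc :=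
              pvCanon_eq _ _ (by unfold pvG; omega) (by unfold pvG; omega)
        _ = pvStepB freq acc 7 := rfl
  · calc pvStepA freq acc 8
        _ = pvCanon (0 + pvG freq 9) (0 + pvG freq 0 + pvG freq 1 + pvG freq 2 + pvG freq 3 + pvG freq 4 + pvG freq 5 + pvG freq 6 + pvG freq 7) 8 acc := rfl
        _ = pvCanon ((pvG freq 0 + pvG freq 1 + pvG freq 2 + pvG freq 3 + pvG freq 4 + pvG freq 5 + pvG freq 6 + pvG freq 7 + pvG freq 8 + pvG freq 9) - (pvG freq 0 + pvG freq 1 + pvG freq 2 + pvG freq 3 + pvG freq 4 + pvG freq 5 + pvG freq 6 + pvG freq 7 + pvG freq 8)) (pvG freq 0 + pvG freq 1 + pvG freq 2 + pvG freq 3 + pvG freq 4 + pvG freq 5 + pvG freq 6 + pvG freq 7) 8 acc :=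
              pvCanon_eq _ _ (by unfold pvG; omega) (by unfold pvG; omega)
        _ = pvStepB freq acc 8 := rfl

def pvCanonI (po pu : Int) : Int × String × Int :=
  ((1 : Int), (if po ≥ pu then "OVER" else "UNDER"), max po pu)

lemma pvCanonI_eq {po pu po' pu' : Int} (hpo : po = po') (hpu : pu = pu') :
    pvCanonI po pu = pvCanonI po' pu' := by rw [hpo, hpu]

lemma pvInit_eq (freq : List (Int × Int)) : pvInitA freq = pvInitB freq :=
  calc pvInitA freq
      _ = pvCanonI (0 + pvG freq 2 + pvG freq 3 + pvG freq 4 + pvG freq 5 + pvG freq 6 + pvG freq 7 + pvG freq 8 + pvG freq 9) (0 + pvG freq 0) := rfl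
      _ = pvCanonI ((pvG freq 0 + pvG freq 1 + pvG freq 2 + pvG freq 3 + pvG freq 4 + pvG freq 5 + pvG freq 6 + pvG freq 7 + pvG freq 8 + pvG freq 9) - (pvG freq 0 + pvG freq 1)) (pvG freq 0) :=
            pvCanonI_eq (by unfold pvG; omega) (by unfold pvG; omega)
      _ = pvInitB freq := rfl

-- ===== VERDICT (by name: the statement is the Claim_ definition above) =====
theorem best_barrier_py_spec : Claim_equal_best_barrier_py := by
  intro freq _
  unfold Spec_best_barrier_py
  rw [pvA_plain freq, pvB_plain freq, pvInit_eq freq]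
  exact PySem.List.foldl_congr_mem _ _ _ _ (fun acc x hx => pvStep_eq freq acc x hx)
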